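-- pv_equiv track=rewrite | github.com/diwert-ai/Problems | Problems/Checkio/Simple/wrong family.py | is_family
-- ===== SOURCE A (Python) =====
-- from collections import deque
--
-- def is_family(tree: list[list[str]]) -> bool:
--     graph = dict()
--     used = set()
--     children = dict()
--
--     def add_edge(v1, v2):
--         graph[v1].add(v2) if v1 in graph else graph.update({v1: {v2}})
--         graph[v2].add(v1) if v2 in graph else graph.update({v2: {v1}})
--         children[v2].append(v1) if v2 in children else children.update({v2: [v1]})
--
--     for parent, child in tree:
--         add_edge(parent, child)
--
--     used.add(tree[0][0])
--     queue = deque([tree[0][0]])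
--     while queue:
--         cur_v = queue.popleft()
--         for neighbor in graph[cur_v]:
--             if neighbor not in used:
--                 used.add(neighbor)
--                 queue.append(neighbor)
--
--     if len(used) != len(graph):
--         return False
--
--     for child in children:
--         if len(children[child]) > 1:
--             return False
--         if children[child][0] in children and children[children[child][0]][0] == child:
--             return False
--
--     return True
-- ===== SOURCE B (Python) =====
-- def is_family(tree: list[list[str]]) -> bool:
--     children = {}
--     verts = []
--     for p, c in tree:
--         if p not in verts:
--             verts.append(p)
--         if c not in verts:
--             verts.append(c)
--         children.setdefault(c, []).append(p)
--
--     # connectivity by round-based saturation to a fixpoint (no queue)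
--     used = {tree[0][0]}
--     while True:
--         new = set(used)
--         for p, c in tree:
--             if p in new or c in new:
--                 new.add(p)
--                 new.add(c)
--         if len(new) == len(used):
--             break
--         used = new
--
--     if len(used) != len(verts):
--         return False
--
--     return all(len(ps) == 1 and not (ps[0] in children and children[ps[0]][0] == c)
--                for c, ps in children.items())
-- ===== Notes on version B (the rewrite author's own statement) =====
-- stated objective: alternative
-- what changed: The BFS (deque + per-vertex adjacency-set dict) connectivity check is replaced by round-based saturation to a fixpoint directly over the edge list (no queue, no adjacency dict), vertices are collected as a deduplicated list instead of graph keys, and the per-child parent checks become a single all(...) over the children dict items.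
import Mathlib
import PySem

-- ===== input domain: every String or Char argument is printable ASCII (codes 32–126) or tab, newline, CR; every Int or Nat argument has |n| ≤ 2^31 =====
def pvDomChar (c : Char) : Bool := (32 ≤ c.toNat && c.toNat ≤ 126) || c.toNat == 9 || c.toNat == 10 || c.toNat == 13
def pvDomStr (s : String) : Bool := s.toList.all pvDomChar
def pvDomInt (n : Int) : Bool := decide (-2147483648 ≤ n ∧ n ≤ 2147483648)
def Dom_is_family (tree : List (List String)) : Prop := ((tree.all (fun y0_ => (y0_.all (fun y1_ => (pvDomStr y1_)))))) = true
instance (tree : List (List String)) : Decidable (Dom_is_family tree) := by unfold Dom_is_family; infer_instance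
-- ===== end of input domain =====

-- B replaces A's deque-BFS over an adjacency-set dict by round-based saturation to a
-- fixpoint directly over the edge list, and folds the per-child checks into one all(...).

-- ===== PORT A =====
-- graph[v].add(w) if v in graph else graph.update({v: {w}})
def pvGStep (g : PySem.Dict String (PySem.Set String)) (k v : String) :
    PySem.Dict String (PySem.Set String) :=
  if g.contains k then g.modify k PySem.Set.empty (fun s => PySem.Set.add s v)
  else g.insert k (PySem.Set.ofList [v])

-- add_edge(v1, v2)
def pvAddEdge (g : PySem.Dict String (PySem.Set String))
    (ch : PySem.Dict String (List String)) (v1 v2 : String) :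
    PySem.Dict String (PySem.Set String) × PySem.Dict String (List String) :=
  let g1 := pvGStep g v1 v2
  let g2 := pvGStep g1 v2 v1
  let ch1 := if ch.contains v2 then ch.modify v2 [] (fun l => l ++ [v1])
             else ch.insert v2 [v1]
  (g2, ch1)

-- one row of the 'for parent, child in tree' loop (rows have length 2 under Pre_)
def pvStepA (st : PySem.Dict String (PySem.Set String) × PySem.Dict String (List String))
    (row : List String) :
    PySem.Dict String (PySem.Set String) × PySem.Dict String (List String) :=
  match row with
  | [parent, child] => pvAddEdge st.1 st.2 parent child
  | _ => st

def pvBuildA (tree : List (List String)) :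
    PySem.Dict String (PySem.Set String) × PySem.Dict String (List String) :=
  tree.foldl pvStepA (PySem.Dict.empty, PySem.Dict.empty)

-- 'if neighbor not in used: used.add(neighbor); queue.append(neighbor)'
def pvBfsStep (st : PySem.Set String × List String) (neighbor : String) :
    PySem.Set String × List String :=
  if PySem.Set.contains st.1 neighbor then st
  else (PySem.Set.add st.1 neighbor, st.2 ++ [neighbor])

-- the 'while queue' BFS loop; fuel only makes the recursion structural (2*size+1 always suffices)
def pvBfs (g : PySem.Dict String (PySem.Set String)) :
    Nat → PySem.Set String → List String → PySem.Set String
  | 0, used, _ => used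
  | _ + 1, used, [] => used
  | fuel + 1, used, curV :: rest =>
    let st := (g.getD curV PySem.Set.empty).foldl pvBfsStep (used, rest)
    pvBfs g fuel st.1 st.2

-- 'for child in children: …' (children[child] is never empty, so [0] is headD)
def pvCheckA (ch : PySem.Dict String (List String)) : List String → Bool
  | [] => true
  | child :: rest =>
    if (ch.getD child []).length > 1 then false
    else if ch.contains ((ch.getD child []).headD "") &&
            ((ch.getD ((ch.getD child []).headD "") []).headD "" == child) then false
    else pvCheckA ch rest

def is_family (tree : List (List String)) : Bool :=
  let st := pvBuildA tree
  let graph := st.1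
  let children := st.2
  match tree with
  | [] => false  -- Python raises IndexError on tree[0]; excluded by Pre_is_family
  | row0 :: _ =>
    let root := row0.headD ""  -- tree[0][0]; rows have length 2 under Pre_is_family
    let used := pvBfs graph (2 * graph.size + 1) (PySem.Set.add PySem.Set.empty root) [root]
    if used.length != graph.size then false
    else pvCheckA children children.keys

-- ===== PORT B =====
-- one row: collect distinct endpoints, children.setdefault(c, []).append(p)
def pvStepB (st : PySem.Dict String (List String) × List String) (row : List String) :
    PySem.Dict String (List String) × List String :=
  match row with
  | [p, c] =>
    let verts := st.2
    let verts1 := if verts.contains p then verts else verts ++ [p]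
    let verts2 := if verts1.contains c then verts1 else verts1 ++ [c]
    ((PySem.Dict.setdefault st.1 c []).modify c [] (fun l => l ++ [p]), verts2)
  | _ => st

def pvBuildB (tree : List (List String)) :
    PySem.Dict String (List String) × List String :=
  tree.foldl pvStepB (PySem.Dict.empty, [])

-- one saturation round over the edge list
def pvSatRound (tree : List (List String)) (u : PySem.Set String) : PySem.Set String :=
  tree.foldl (fun u row =>
    match row with
    | [p, c] =>
      if PySem.Set.contains u p || PySem.Set.contains u c
      then PySem.Set.add (PySem.Set.add u p) c else u
    | _ => u) u

-- 'while True: … if len(new) == len(used): break'; fuel only makes it structural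
def pvSat (tree : List (List String)) : Nat → PySem.Set String → PySem.Set String
  | 0, u => u
  | fuel + 1, u =>
    let n := pvSatRound tree u
    if n.length == u.length then u else pvSat tree fuel n

def pvCheckB (ch : PySem.Dict String (List String)) : Bool :=
  ch.items.all (fun cp =>
    (cp.2.length == 1) &&
    !(ch.contains (cp.2.headD "") && ((ch.getD (cp.2.headD "") []).headD "" == cp.1)))

def is_family_alt (tree : List (List String)) : Bool :=
  let st := pvBuildB tree
  let children := st.1
  let verts := st.2
  match tree with
  | [] => false  -- Python raises IndexError on tree[0][0]; excluded by Pre_is_family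
  | row0 :: _ =>
    let root := row0.headD ""
    let used := pvSat tree (verts.length + 1) (PySem.Set.ofList [root])
    if used.length != verts.length then false
    else pvCheckB children

-- ===== PRECONDITION & SPEC =====
-- Pre_ excludes exactly the inputs where the Python A raises: the empty tree (IndexError
-- on tree[0]) and rows that are not [parent, child] pairs (ValueError on unpacking).
def Pre_is_family (tree : List (List String)) : Prop :=
  tree ≠ [] ∧ ∀ row ∈ tree, row.length = 2
instance (tree : List (List String)) : Decidable (Pre_is_family tree) := by
  unfold Pre_is_family; infer_instance

def pvWitness_is_family : List (List String) := [["a", "b"], ["a", "c"]]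

def Spec_is_family (tree : List (List String)) (out : Bool) : Prop := out = is_family_alt tree
instance (tree : List (List String)) (out : Bool) : Decidable (Spec_is_family tree out) := by
  unfold Spec_is_family; infer_instance

-- ===== CLAIM (what is proved, stated in full; the proofs are below) =====
def Claim_equal_is_family : Prop :=
  ∀ (tree : List (List String)), Dom_is_family tree → Pre_is_family tree →
    Spec_is_family tree (is_family tree)

-- ===== LEMMAS AND PROOFS =====

-- the (parent, child) pairs of the tree's rows
def pvEdges (tree : List (List String)) : List (String × String) :=
  tree.filterMap (fun row => match row with | [p, c] => some (p, c) | _ => none)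

def pvVert (E : List (String × String)) (x : String) : Prop :=
  ∃ e ∈ E, x = e.1 ∨ x = e.2

def pvAdj (E : List (String × String)) (x y : String) : Prop :=
  ∃ e ∈ E, (x = e.1 ∧ y = e.2) ∨ (x = e.2 ∧ y = e.1)

inductive pvReach (E : List (String × String)) (root : String) : String → Prop
  | refl : pvReach E root root
  | step {x y : String} : pvReach E root x → pvAdj E x y → pvReach E root y

theorem pvAdj_symm {E : List (String × String)} {x y : String} (h : pvAdj E x y) : pvAdj E y x := by
  obtain ⟨e, he, h⟩ := h; exact ⟨e, he, h.symm.imp And.symm And.symm⟩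

theorem pvAdj_vert {E : List (String × String)} {x y : String} (h : pvAdj E x y) : pvVert E y := by
  obtain ⟨e, he, h⟩ := h
  · rcases h with ⟨_, h2⟩ | ⟨_, h2⟩
    · exact ⟨e, he, Or.inr h2⟩
    · exact ⟨e, he, Or.inl h2⟩

theorem pvAdj_cons {e : String × String} {E : List (String × String)} {x y : String} :
    pvAdj (e :: E) x y ↔ ((x = e.1 ∧ y = e.2) ∨ (x = e.2 ∧ y = e.1)) ∨ pvAdj E x y := by
  simp [pvAdj]

theorem pvVert_cons {e : String × String} {E : List (String × String)} {x : String} :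
    pvVert (e :: E) x ↔ (x = e.1 ∨ x = e.2) ∨ pvVert E x := by
  simp [pvVert]

theorem pvAdj_mono {e : String × String} {E : List (String × String)} {x y : String}
    (h : pvAdj E x y) : pvAdj (e :: E) x y := pvAdj_cons.2 (Or.inr h)

theorem pvVert_mono {e : String × String} {E : List (String × String)} {x : String}
    (h : pvVert E x) : pvVert (e :: E) x := pvVert_cons.2 (Or.inr h)

-- ---- splitting the two builder folds into independent component folds ----

def pvGRow (g : PySem.Dict String (PySem.Set String)) (row : List String) :
    PySem.Dict String (PySem.Set String) :=
  match row with
  | [p, c] => pvGStep (pvGStep g p c) c p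
  | _ => g

def pvChRowA (ch : PySem.Dict String (List String)) (row : List String) :
    PySem.Dict String (List String) :=
  match row with
  | [p, c] => if ch.contains c then ch.modify c [] (fun l => l ++ [p]) else ch.insert c [p]
  | _ => ch

def pvChRowB (ch : PySem.Dict String (List String)) (row : List String) :
    PySem.Dict String (List String) :=
  match row with
  | [p, c] => (PySem.Dict.setdefault ch c []).modify c [] (fun l => l ++ [p])
  | _ => ch

def pvVRow (verts : List String) (row : List String) : List String :=
  match row with
  | [p, c] =>
    let verts1 := if verts.contains p then verts else verts ++ [p]
    if verts1.contains c then verts1 else verts1 ++ [c]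
  | _ => verts

theorem pvBuildA_split (tree : List (List String)) (g : PySem.Dict String (PySem.Set String))
    (ch : PySem.Dict String (List String)) :
    tree.foldl pvStepA (g, ch) = (tree.foldl pvGRow g, tree.foldl pvChRowA ch) := by
  induction tree generalizing g ch with
  | nil => rfl
  | cons row t ih =>
    have hstep : pvStepA (g, ch) row = (pvGRow g row, pvChRowA ch row) := by
      rcases row with _ | ⟨p, _ | ⟨c, _ | ⟨d, t'⟩⟩⟩ <;> rfl
    simp only [List.foldl_cons, hstep, ih]

theorem pvBuildB_split (tree : List (List String)) (ch : PySem.Dict String (List String))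
    (verts : List String) :
    tree.foldl pvStepB (ch, verts) = (tree.foldl pvChRowB ch, tree.foldl pvVRow verts) := by
  induction tree generalizing ch verts with
  | nil => rfl
  | cons row t ih =>
    have hstep : pvStepB (ch, verts) row = (pvChRowB ch row, pvVRow verts row) := by
      rcases row with _ | ⟨p, _ | ⟨c, _ | ⟨d, t'⟩⟩⟩ <;> rfl
    simp only [List.foldl_cons, hstep, ih]

-- the two children folds build the SAME dict
theorem pvChRow_eq (ch : PySem.Dict String (List String)) (row : List String) :
    pvChRowA ch row = pvChRowB ch row := by
  rcases row with _ | ⟨p, _ | ⟨c, _ | ⟨d, t⟩⟩⟩ <;> try rfl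
  show (if ch.contains c = true then ch.modify c [] (fun l => l ++ [p]) else ch.insert c [p]) =
    (PySem.Dict.setdefault ch c []).modify c [] (fun l => l ++ [p])
  by_cases h : ch.contains c = true
  · simp only [PySem.Dict.setdefault, h, if_true]
  · have hc : ch.contains c = false := by simpa using h
    have hany : ∀ a ∈ ch.items, (a.1 == c) = false := by
      intro a ha
      have := List.any_eq_false.1 hc a ha
      simpa using this
    have hfind : List.find? (fun pr => pr.1 == c) ch.items = none := by
      rw [List.find?_eq_none]
      intro a ha
      simp [hany a ha]
    have hsd : PySem.Dict.setdefault ch c [] = PySem.Dict.mk (ch.items ++ [(c, [])]) := by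
      simp [PySem.Dict.setdefault, hc]
    have hget : (PySem.Dict.setdefault ch c []).getD c [] = [] := by
      simp [hsd, PySem.Dict.getD, PySem.Dict.get?, List.find?_append, hfind]
    have hcont2 : (PySem.Dict.setdefault ch c []).contains c = true := by
      simp [hsd, PySem.Dict.contains, List.any_append]
    rw [if_neg h]
    simp only [PySem.Dict.modify, hget]
    rw [hsd]
    show ch.insert c [p] = PySem.Dict.insert (PySem.Dict.mk (ch.items ++ [(c, [])])) c ([] ++ [p])
    have hcont2' : (PySem.Dict.mk (ch.items ++ [(c, [])])).contains c = true := by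
      rw [← hsd]; exact hcont2
    simp only [PySem.Dict.insert, hc, hcont2', if_true, Bool.false_eq_true, if_false]
    congr 1
    show ch.items ++ [(c, [p])] =
      (ch.items ++ [(c, [])]).map (fun pr : String × List String => if pr.1 == c then (c, [] ++ [p]) else pr)
    rw [List.map_append]
    have hmap : ch.items.map (fun pr : String × List String => if pr.1 == c then (c, [] ++ [p]) else pr) = ch.items := by
      rw [List.map_congr_left (g := id) (fun a ha => by simp [hany a ha])]
      exact List.map_id _
    rw [hmap]
    simp

-- ---- graph characterisation ----

theorem pvGStep_eq (g : PySem.Dict String (PySem.Set String)) (k v : String) :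
    pvGStep g k v = g.insert k (PySem.Set.add (g.getD k PySem.Set.empty) v) := by
  unfold pvGStep
  split_ifs with h
  · rfl
  · have h0 : g.getD k (PySem.Set.empty : PySem.Set String) = PySem.Set.empty :=
      PySem.Dict.getD_of_not_contains g _ (by simpa using h)
    rw [h0]
    rfl


theorem pvGStep_contains (g : PySem.Dict String (PySem.Set String)) (k v x : String) :
    (pvGStep g k v).contains x = (x == k || g.contains x) := by
  rw [pvGStep_eq]; exact PySem.Dict.contains_insert g k x _

theorem pvGStep_getD (g : PySem.Dict String (PySem.Set String)) (k v x : String) :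
    (pvGStep g k v).getD x PySem.Set.empty =
      if x = k then PySem.Set.add (g.getD k PySem.Set.empty) v else g.getD x PySem.Set.empty := by
  rw [pvGStep_eq]; exact PySem.Dict.getD_insert g k x _ _

theorem pvGRow_contains (g : PySem.Dict String (PySem.Set String)) (p c x : String) :
    (pvGRow g [p, c]).contains x = true ↔ (x = p ∨ x = c) ∨ g.contains x = true := by
  simp only [pvGRow, pvGStep_contains, Bool.or_eq_true, beq_iff_eq]
  tauto

theorem pvGRow_adj (g : PySem.Dict String (PySem.Set String)) (p c x y : String) :
    PySem.Set.contains ((pvGRow g [p, c]).getD x PySem.Set.empty) y = true ↔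
      ((x = p ∧ y = c) ∨ (x = c ∧ y = p)) ∨
        PySem.Set.contains (g.getD x PySem.Set.empty) y = true := by
  simp only [pvGRow, pvGStep_getD, PySem.Set.contains, List.contains_iff_mem]
  by_cases hxc : x = c <;> by_cases hxp : x = p <;> by_cases hcp : c = p <;>
    simp_all [PySem.Set.mem_add] <;> tauto

theorem pvGfold_contains (tree : List (List String)) (g : PySem.Dict String (PySem.Set String))
    (x : String) :
    (tree.foldl pvGRow g).contains x = true ↔
      g.contains x = true ∨ pvVert (pvEdges tree) x := by
  induction tree generalizing g with
  | nil => simp [pvEdges, pvVert]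
  | cons row t ih =>
    rcases row with _ | ⟨p, _ | ⟨c, _ | ⟨d, t'⟩⟩⟩
    · simpa [pvEdges, pvGRow] using ih g
    · simpa [pvEdges, pvGRow] using ih g
    · rw [List.foldl_cons]
      show (List.foldl pvGRow (pvGRow g [p, c]) t).contains x = true ↔ _
      rw [ih (pvGRow g [p, c])]
      have he : pvEdges ([p, c] :: t) = (p, c) :: pvEdges t := by simp [pvEdges]
      rw [he, pvVert_cons, pvGRow_contains]
      tauto
    · simpa [pvEdges, pvGRow] using ih g

theorem pvGfold_adj (tree : List (List String)) (g : PySem.Dict String (PySem.Set String))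
    (x y : String) :
    PySem.Set.contains ((tree.foldl pvGRow g).getD x PySem.Set.empty) y = true ↔
      PySem.Set.contains (g.getD x PySem.Set.empty) y = true ∨ pvAdj (pvEdges tree) x y := by
  induction tree generalizing g with
  | nil => simp [pvEdges, pvAdj]
  | cons row t ih =>
    rcases row with _ | ⟨p, _ | ⟨c, _ | ⟨d, t'⟩⟩⟩
    · simpa [pvEdges, pvGRow] using ih g
    · simpa [pvEdges, pvGRow] using ih g
    · rw [List.foldl_cons]
      show PySem.Set.contains ((List.foldl pvGRow (pvGRow g [p, c]) t).getD x PySem.Set.empty) y = true ↔ _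
      rw [ih (pvGRow g [p, c])]
      have he : pvEdges ([p, c] :: t) = (p, c) :: pvEdges t := by simp [pvEdges]
      rw [he, pvAdj_cons, pvGRow_adj]
      tauto
    · simpa [pvEdges, pvGRow] using ih g

theorem pvGfold_nodup (tree : List (List String)) (g : PySem.Dict String (PySem.Set String))
    (h : (PySem.Dict.keys g).Nodup) : (PySem.Dict.keys (tree.foldl pvGRow g)).Nodup := by
  induction tree generalizing g with
  | nil => exact h
  | cons row t ih =>
    rcases row with _ | ⟨p, _ | ⟨c, _ | ⟨d, t'⟩⟩⟩
    · exact ih g h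
    · exact ih g h
    · rw [List.foldl_cons]
      refine ih (pvGRow g [p, c]) ?_
      show (PySem.Dict.keys (pvGStep (pvGStep g p c) c p)).Nodup
      rw [pvGStep_eq, pvGStep_eq]
      exact PySem.Dict.nodup_keys_insert _ _ _ (PySem.Dict.nodup_keys_insert _ _ _ h)
    · exact ih g h

-- ---- verts characterisation ----

theorem pvVRow_mem (verts : List String) (p c z : String) :
    z ∈ pvVRow verts [p, c] ↔ (z = p ∨ z = c) ∨ z ∈ verts := by
  simp only [pvVRow]
  split_ifs with h1 h2 h3 <;>
    simp_all [List.mem_append] <;> aesop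

theorem pvVRow_nodup (verts : List String) (p c : String) (h : verts.Nodup) :
    (pvVRow verts [p, c]).Nodup := by
  simp only [pvVRow]
  split_ifs with h1 h2 h3 <;>
    simp_all [List.nodup_append] <;> aesop

theorem pvVfold_mem (tree : List (List String)) (verts : List String) (x : String) :
    x ∈ tree.foldl pvVRow verts ↔ x ∈ verts ∨ pvVert (pvEdges tree) x := by
  induction tree generalizing verts with
  | nil => simp [pvEdges, pvVert]
  | cons row t ih =>
    rcases row with _ | ⟨p, _ | ⟨c, _ | ⟨d, t'⟩⟩⟩
    · simpa [pvEdges, pvVRow] using ih verts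
    · simpa [pvEdges, pvVRow] using ih verts
    · rw [List.foldl_cons]
      show x ∈ List.foldl pvVRow (pvVRow verts [p, c]) t ↔ _
      rw [ih (pvVRow verts [p, c])]
      have he : pvEdges ([p, c] :: t) = (p, c) :: pvEdges t := by simp [pvEdges]
      rw [he, pvVert_cons, pvVRow_mem]
      tauto
    · simpa [pvEdges, pvVRow] using ih verts

theorem pvVfold_nodup (tree : List (List String)) (verts : List String)
    (h : verts.Nodup) : (tree.foldl pvVRow verts).Nodup := by
  induction tree generalizing verts with
  | nil => exact h
  | cons row t ih =>
    rcases row with _ | ⟨p, _ | ⟨c, _ | ⟨d, t'⟩⟩⟩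
    · exact ih verts h
    · exact ih verts h
    · exact ih (pvVRow verts [p, c]) (pvVRow_nodup verts p c h)
    · exact ih verts h

-- ---- children dict invariants ----

theorem pvChfold_nodup (tree : List (List String)) (ch : PySem.Dict String (List String))
    (h : (PySem.Dict.keys ch).Nodup) : (PySem.Dict.keys (tree.foldl pvChRowA ch)).Nodup := by
  induction tree generalizing ch with
  | nil => exact h
  | cons row t ih =>
    rcases row with _ | ⟨p, _ | ⟨c, _ | ⟨d, t'⟩⟩⟩
    · exact ih ch h
    · exact ih ch h
    · rw [List.foldl_cons]
      refine ih (pvChRowA ch [p, c]) ?_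
      show (PySem.Dict.keys (if ch.contains c then ch.modify c [] (fun l => l ++ [p])
        else ch.insert c [p])).Nodup
      split_ifs <;> exact PySem.Dict.nodup_keys_insert _ _ _ h
    · exact ih ch h

theorem pvChfold_values_ne_nil (tree : List (List String)) (ch : PySem.Dict String (List String))
    (h : ∀ v ∈ PySem.Dict.values ch, v ≠ []) :
    ∀ v ∈ PySem.Dict.values (tree.foldl pvChRowA ch), v ≠ [] := by
  induction tree generalizing ch with
  | nil => exact h
  | cons row t ih =>
    rcases row with _ | ⟨p, _ | ⟨c, _ | ⟨d, t'⟩⟩⟩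
    · exact ih ch h
    · exact ih ch h
    · rw [List.foldl_cons]
      refine ih (pvChRowA ch [p, c]) ?_
      intro v hv
      show v ≠ []
      revert hv
      show v ∈ PySem.Dict.values (if ch.contains c then ch.modify c [] (fun l => l ++ [p])
        else ch.insert c [p]) → v ≠ []
      split_ifs with hc
      · intro hv
        rcases PySem.Dict.mem_values_insert _ _ _ _ hv with h1 | h1
        · simp [h1]
        · exact h v h1
      · intro hv
        rcases PySem.Dict.mem_values_insert _ _ _ _ hv with h1 | h1
        · simp [h1]
        · exact h v h1
    · exact ih ch h

-- ---- BFS ----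

theorem pvLen_le {u V : List String} (hund : u.Nodup) (hVnd : V.Nodup)
    (hsub : ∀ x ∈ u, x ∈ V) : u.length ≤ V.length := by
  classical
  rw [← List.toFinset_card_of_nodup hund, ← List.toFinset_card_of_nodup hVnd]
  exact Finset.card_le_card (fun a ha => List.mem_toFinset.2 (hsub a (List.mem_toFinset.1 ha)))

theorem pvSize_keys (g : PySem.Dict String (PySem.Set String)) :
    g.size = (PySem.Dict.keys g).length := by
  simp [PySem.Dict.size, PySem.Dict.keys]

theorem pvBfsInner (ns : List String) (u : PySem.Set String) (q : List String) :
    ∃ new, ns.foldl pvBfsStep (u, q) = (u ++ new, q ++ new) ∧ new.Nodup ∧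
      (∀ x ∈ new, x ∈ ns ∧ x ∉ u) ∧ (∀ x ∈ ns, x ∈ u ++ new) := by
  induction ns generalizing u q with
  | nil => exact ⟨[], by simp, by simp, by simp, by simp⟩
  | cons n t ih =>
    by_cases h : PySem.Set.contains u n = true
    · have hmem : n ∈ u := by simpa [PySem.Set.contains, List.contains_iff_mem] using h
      have hstep : pvBfsStep (u, q) n = (u, q) := by simp [pvBfsStep, hmem]
      obtain ⟨new, heq, hnd, hprops, hns⟩ := ih u q
      refine ⟨new, ?_, hnd, ?_, ?_⟩
      · rw [List.foldl_cons, hstep, heq]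
      · intro x hx; exact ⟨List.mem_cons_of_mem _ (hprops x hx).1, (hprops x hx).2⟩
      · intro x hx
        rcases List.mem_cons.1 hx with rfl | hx'
        · exact List.mem_append.2 (Or.inl (by
            simpa [PySem.Set.contains, List.contains_iff_mem] using h))
        · exact hns x hx'
    · have hnot : n ∉ u := by simpa [PySem.Set.contains, List.contains_iff_mem] using h
      have hstep : pvBfsStep (u, q) n = (u ++ [n], q ++ [n]) := by
        simp [pvBfsStep, PySem.Set.add, hnot]
      obtain ⟨new, heq, hnd, hprops, hns⟩ := ih (u ++ [n]) (q ++ [n])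
      refine ⟨n :: new, ?_, ?_, ?_, ?_⟩
      · rw [List.foldl_cons, hstep, heq]
        simp
      · refine List.nodup_cons.2 ⟨?_, hnd⟩
        intro hmem
        exact (hprops n hmem).2 (List.mem_append.2 (Or.inr (List.mem_singleton.2 rfl)))
      · intro x hx
        rcases List.mem_cons.1 hx with rfl | hx'
        · exact ⟨List.mem_cons_self, hnot⟩
        · obtain ⟨hin, hnin⟩ := hprops x hx'
          exact ⟨List.mem_cons_of_mem _ hin, fun hxu => hnin (List.mem_append.2 (Or.inl hxu))⟩
      · intro x hx
        rcases List.mem_cons.1 hx with rfl | hx'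
        · simp
        · have := hns x hx'
          simp only [List.append_assoc, List.singleton_append] at this
          exact this

theorem pvBfs_spec (g : PySem.Dict String (PySem.Set String)) (R : String → Prop)
    (hstep : ∀ x y, R x → PySem.Set.contains (g.getD x PySem.Set.empty) y = true → R y)
    (hkeys : ∀ x y, PySem.Set.contains (g.getD x PySem.Set.empty) y = true → g.contains y = true)
    (hgnd : (PySem.Dict.keys g).Nodup) :
    ∀ (fuel : Nat) (used : PySem.Set String) (queue : List String),
      used.Nodup → queue.Nodup → (∀ x ∈ queue, x ∈ used) →
      (∀ x ∈ used, g.contains x = true) → (∀ x ∈ used, R x) →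
      (∀ x ∈ used, x ∉ queue → ∀ y, PySem.Set.contains (g.getD x PySem.Set.empty) y = true → y ∈ used) →
      2 * (g.size - used.length) + queue.length ≤ fuel →
      (∀ x ∈ used, x ∈ pvBfs g fuel used queue) ∧ (pvBfs g fuel used queue).Nodup ∧
        (∀ x ∈ pvBfs g fuel used queue, R x) ∧
        (∀ x ∈ pvBfs g fuel used queue, g.contains x = true) ∧
        (∀ x ∈ pvBfs g fuel used queue, ∀ y,
          PySem.Set.contains (g.getD x PySem.Set.empty) y = true → y ∈ pvBfs g fuel used queue) := by
  intro fuel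
  induction fuel with
  | zero =>
    intro used queue hund hqnd hqu huk hR hcl hfuel
    have hq : queue = [] := by
      have : queue.length = 0 := by omega
      exact List.length_eq_zero_iff.1 this
    subst hq
    exact ⟨fun x h => h, hund, hR, huk, fun x hx y hy => hcl x hx (by simp) y hy⟩
  | succ fuel ih =>
    intro used queue hund hqnd hqu huk hR hcl hfuel
    cases queue with
    | nil =>
      exact ⟨fun x h => h, hund, hR, huk, fun x hx y hy => hcl x hx (by simp) y hy⟩
    | cons cur rest =>
      obtain ⟨new, heq, hnnd, hnew, hns⟩ := pvBfsInner (g.getD cur PySem.Set.empty) used rest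
      have hbfs : pvBfs g (fuel + 1) used (cur :: rest) = pvBfs g fuel (used ++ new) (rest ++ new) := by
        show pvBfs g fuel ((g.getD cur PySem.Set.empty).foldl pvBfsStep (used, rest)).1
          ((g.getD cur PySem.Set.empty).foldl pvBfsStep (used, rest)).2 = _
        rw [heq]
      have hcur_used : cur ∈ used := hqu cur List.mem_cons_self
      have hnewadj : ∀ x ∈ new, PySem.Set.contains (g.getD cur PySem.Set.empty) x = true := by
        intro x hx
        have := (hnew x hx).1
        simpa [PySem.Set.contains, List.contains_iff_mem] using this
      have hnsmem : ∀ y, PySem.Set.contains (g.getD cur PySem.Set.empty) y = true →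
          y ∈ used ++ new := by
        intro y hy
        exact hns y (by simpa [PySem.Set.contains, List.contains_iff_mem] using hy)
      have hrest_nd : rest.Nodup := hqnd.of_cons
      have hdisj : ∀ a ∈ new, a ∉ used := fun a ha => (hnew a ha).2
      have hund' : (used ++ new).Nodup :=
        List.nodup_append.2 ⟨hund, hnnd, by
          intro a ha b hb hab
          exact hdisj b hb (hab ▸ ha)⟩
      have hqnd' : (rest ++ new).Nodup :=
        List.nodup_append.2 ⟨hrest_nd, hnnd, by
          intro a ha b hb hab
          exact hdisj b hb (hab ▸ hqu a (List.mem_cons_of_mem _ ha))⟩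
      have hqu' : ∀ x ∈ rest ++ new, x ∈ used ++ new := by
        intro x hx
        rcases List.mem_append.1 hx with hx' | hx'
        · exact List.mem_append.2 (Or.inl (hqu x (List.mem_cons_of_mem _ hx')))
        · exact List.mem_append.2 (Or.inr hx')
      have huk' : ∀ x ∈ used ++ new, g.contains x = true := by
        intro x hx
        rcases List.mem_append.1 hx with hx' | hx'
        · exact huk x hx'
        · exact hkeys cur x (hnewadj x hx')
      have hR' : ∀ x ∈ used ++ new, R x := by
        intro x hx
        rcases List.mem_append.1 hx with hx' | hx'
        · exact hR x hx'
        · exact hstep cur x (hR cur hcur_used) (hnewadj x hx')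
      have hcl' : ∀ x ∈ used ++ new, x ∉ rest ++ new → ∀ y,
          PySem.Set.contains (g.getD x PySem.Set.empty) y = true → y ∈ used ++ new := by
        intro x hx hxq y hy
        rcases List.mem_append.1 hx with hx' | hx'
        · by_cases hxc : x = cur
          · subst hxc
            exact hnsmem y hy
          · have hxnq : x ∉ cur :: rest := by
              intro hmem
              rcases List.mem_cons.1 hmem with h1 | h1
              · exact hxc h1
              · exact hxq (List.mem_append.2 (Or.inl h1))
            exact List.mem_append.2 (Or.inl (hcl x hx' hxnq y hy))
        · exact absurd (List.mem_append.2 (Or.inr hx')) hxq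
      have hsize : (used ++ new).length ≤ g.size := by
        rw [pvSize_keys]
        exact pvLen_le hund' hgnd
          (fun x hx => (PySem.Dict.contains_iff_mem_keys g x).1 (huk' x hx))
      have hfuel' : 2 * (g.size - (used ++ new).length) + (rest ++ new).length ≤ fuel := by
        simp only [List.length_append] at hsize ⊢
        simp only [List.length_cons] at hfuel
        omega
      obtain ⟨c1, c2, c3, c4, c5⟩ := ih (used ++ new) (rest ++ new)
        hund' hqnd' hqu' huk' hR' hcl' hfuel'
      rw [hbfs]
      exact ⟨fun x hx => c1 x (List.mem_append.2 (Or.inl hx)), c2, c3, c4, c5⟩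

-- ---- saturation ----

theorem pvSatRound_spec (tree : List (List String)) (R : String → Prop) :
    ∀ (u : PySem.Set String),
      (∀ x y, R x → pvAdj (pvEdges tree) x y → R y) → u.Nodup → (∀ x ∈ u, R x) →
      ∃ ext, pvSatRound tree u = u ++ ext ∧ (u ++ ext).Nodup ∧
        (∀ x ∈ ext, pvVert (pvEdges tree) x) ∧ (∀ x ∈ u ++ ext, R x) ∧
        (∀ x ∈ u, ∀ y, pvAdj (pvEdges tree) x y → y ∈ u ++ ext) := by
  induction tree with
  | nil =>
    intro u hstep hnd hR
    exact ⟨[], by simp [pvSatRound], by simpa using hnd, by simp,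
      by simpa using hR, by simp [pvAdj, pvEdges]⟩
  | cons row t ih =>
    intro u hstep hnd hR
    rcases row with _ | ⟨p, _ | ⟨c, _ | ⟨d, t'⟩⟩⟩
    · have heq : pvEdges ([] :: t) = pvEdges t := by simp [pvEdges]
      obtain ⟨ext, h1, h2, h3, h4, h5⟩ :=
        ih u (fun x y hx ha => hstep x y hx (heq ▸ ha)) hnd hR
      exact ⟨ext, h1, h2, fun x hx => heq ▸ h3 x hx, h4,
        fun x hx y hy => h5 x hx y (heq ▸ hy)⟩
    · have heq : pvEdges ([p] :: t) = pvEdges t := by simp [pvEdges]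
      obtain ⟨ext, h1, h2, h3, h4, h5⟩ :=
        ih u (fun x y hx ha => hstep x y hx (heq ▸ ha)) hnd hR
      exact ⟨ext, h1, h2, fun x hx => heq ▸ h3 x hx, h4,
        fun x hx y hy => h5 x hx y (heq ▸ hy)⟩
    · have he : pvEdges ([p, c] :: t) = (p, c) :: pvEdges t := by simp [pvEdges]
      have hstep' : ∀ x y, R x → pvAdj (pvEdges t) x y → R y :=
        fun x y hx ha => hstep x y hx (he ▸ pvAdj_mono ha)
      have hadj_pc : pvAdj (pvEdges ([p, c] :: t)) p c := by
        rw [he]; exact ⟨(p, c), List.mem_cons_self, Or.inl ⟨rfl, rfl⟩⟩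
      have hfold : pvSatRound ([p, c] :: t) u = pvSatRound t
          (if PySem.Set.contains u p || PySem.Set.contains u c
           then PySem.Set.add (PySem.Set.add u p) c else u) := rfl
      by_cases hcond : (PySem.Set.contains u p || PySem.Set.contains u c) = true
      · have hmem1 : ∀ z, z ∈ PySem.Set.add (PySem.Set.add u p) c ↔ z ∈ u ∨ z = p ∨ z = c := by
          intro z
          rw [PySem.Set.mem_add, PySem.Set.mem_add]
          tauto
        have hnd1 : (PySem.Set.add (PySem.Set.add u p) c).Nodup :=
          PySem.Set.nodup_add _ _ (PySem.Set.nodup_add _ _ hnd)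
        have hpc_mem : p ∈ PySem.Set.add (PySem.Set.add u p) c ∧
            c ∈ PySem.Set.add (PySem.Set.add u p) c := by
          constructor <;> (rw [hmem1]; tauto)
        have hRpc : R p ∧ R c := by
          have : p ∈ u ∨ c ∈ u := by
            rcases Bool.or_eq_true_iff.1 hcond with h' | h' <;>
              [left; right] <;>
              simpa [PySem.Set.contains, List.contains_iff_mem] using h'
          rcases this with h' | h'
          · exact ⟨hR p h', hstep p c (hR p h') hadj_pc⟩
          · exact ⟨hstep c p (hR c h') (pvAdj_symm hadj_pc), hR c h'⟩
        have hR1 : ∀ x ∈ PySem.Set.add (PySem.Set.add u p) c, R x := by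
          intro x hx
          rcases (hmem1 x).1 hx with h' | rfl | rfl
          · exact hR x h'
          · exact hRpc.1
          · exact hRpc.2
        obtain ⟨δ, hδeq, hδmem⟩ :
            ∃ δ, PySem.Set.add (PySem.Set.add u p) c = u ++ δ ∧ ∀ x ∈ δ, x = p ∨ x = c := by
          by_cases hq1 : p ∈ u
          · by_cases hq2 : c ∈ u
            · exact ⟨[], by simp [PySem.Set.add, hq1, hq2], by simp⟩
            · exact ⟨[c], by simp [PySem.Set.add, hq1, hq2], by simp⟩
          · by_cases hq2 : c ∈ u ++ [p]
            · exact ⟨[p], by simp [PySem.Set.add, hq1, hq2], by simp⟩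
            · exact ⟨[p, c], by simp [PySem.Set.add, hq1, hq2], by simp⟩
        obtain ⟨ext, h1, h2, h3, h4, h5⟩ := ih (PySem.Set.add (PySem.Set.add u p) c) hstep' hnd1 hR1
        rw [hδeq] at h1 h2 h4 h5 hpc_mem
        refine ⟨δ ++ ext, ?_, ?_, ?_, ?_, ?_⟩
        · rw [hfold, if_pos hcond, hδeq, h1, List.append_assoc]
        · rw [← List.append_assoc]; exact h2
        · intro x hx
          rcases List.mem_append.1 hx with hx' | hx'
          · rcases hδmem x hx' with rfl | rfl
            · exact pvAdj_vert (pvAdj_symm hadj_pc)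
            · exact pvAdj_vert hadj_pc
          · rw [he]; exact pvVert_mono (h3 x hx')
        · intro x hx
          rw [← List.append_assoc] at hx
          exact h4 x hx
        · intro x hx y hy
          rw [← List.append_assoc]
          rw [he, pvAdj_cons] at hy
          rcases hy with (⟨rfl, rfl⟩ | ⟨rfl, rfl⟩) | hy'
          · exact List.mem_append.2 (Or.inl hpc_mem.2)
          · exact List.mem_append.2 (Or.inl hpc_mem.1)
          · exact h5 x (List.mem_append.2 (Or.inl hx)) y hy'
      · have hp : p ∉ u ∧ c ∉ u := by
          have h2 := Bool.or_eq_false_iff.1 (eq_false_of_ne_true hcond)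
          constructor
          · simpa [PySem.Set.contains, List.contains_iff_mem] using h2.1
          · simpa [PySem.Set.contains, List.contains_iff_mem] using h2.2
        obtain ⟨ext, h1, h2, h3, h4, h5⟩ := ih u hstep' hnd hR
        refine ⟨ext, ?_, h2, ?_, h4, ?_⟩
        · rw [hfold, if_neg hcond]; exact h1
        · intro x hx; rw [he]; exact pvVert_mono (h3 x hx)
        · intro x hx y hy
          rw [he, pvAdj_cons] at hy
          rcases hy with (⟨rfl, rfl⟩ | ⟨rfl, rfl⟩) | hy'
          · exact absurd hx hp.1
          · exact absurd hx hp.2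
          · exact h5 x hx y hy'
    · have heq : pvEdges ((p :: c :: d :: t') :: t) = pvEdges t := by simp [pvEdges]
      obtain ⟨ext, h1, h2, h3, h4, h5⟩ :=
        ih u (fun x y hx ha => hstep x y hx (heq ▸ ha)) hnd hR
      exact ⟨ext, h1, h2, fun x hx => heq ▸ h3 x hx, h4,
        fun x hx y hy => h5 x hx y (heq ▸ hy)⟩
theorem pvSat_spec (tree : List (List String)) (R : String → Prop) (verts : List String)
    (hstep : ∀ x y, R x → pvAdj (pvEdges tree) x y → R y)
    (hvm : ∀ x, x ∈ verts ↔ pvVert (pvEdges tree) x) (hvnd : verts.Nodup) :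
    ∀ (fuel : Nat) (u : PySem.Set String),
      u.Nodup → (∀ x ∈ u, R x) → (∀ x ∈ u, x ∈ verts) →
      verts.length + 1 ≤ fuel + u.length →
      (∀ x ∈ u, x ∈ pvSat tree fuel u) ∧ (pvSat tree fuel u).Nodup ∧
        (∀ x ∈ pvSat tree fuel u, R x) ∧ (∀ x ∈ pvSat tree fuel u, x ∈ verts) ∧
        (∀ x ∈ pvSat tree fuel u, ∀ y, pvAdj (pvEdges tree) x y → y ∈ pvSat tree fuel u) := by
  intro fuel
  induction fuel with
  | zero =>
    intro u hnd hR hsub hfuel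
    have : u.length ≤ verts.length := pvLen_le hnd hvnd hsub
    omega
  | succ fuel ih =>
    intro u hnd hR hsub hfuel
    obtain ⟨ext, h1, h2, h3, h4, h5⟩ := pvSatRound_spec tree R u hstep hnd hR
    have hsat : pvSat tree (fuel + 1) u =
        if (pvSatRound tree u).length == u.length then u else pvSat tree fuel (pvSatRound tree u) := rfl
    by_cases hlen : (pvSatRound tree u).length = u.length
    · have hext : ext = [] := by
        rw [h1, List.length_append] at hlen
        exact List.length_eq_zero_iff.1 (by omega)
      subst hext
      rw [hsat, if_pos (Nat.beq_eq_true_eq _ _ ▸ by simpa using hlen)]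
      refine ⟨fun x hx => hx, hnd, hR, hsub, ?_⟩
      intro x hx y hy
      have := h5 x hx y hy
      simpa using this
    · have hlt : u.length < (pvSatRound tree u).length := by
        rw [h1, List.length_append]
        rcases Nat.eq_zero_or_pos ext.length with h0 | h0
        · exact absurd (by rw [h1, List.length_append, h0]; omega) hlen
        · omega
      have hR' : ∀ x ∈ pvSatRound tree u, R x := by rw [h1]; exact h4
      have hsub' : ∀ x ∈ pvSatRound tree u, x ∈ verts := by
        rw [h1]
        intro x hx
        rcases List.mem_append.1 hx with hx' | hx'
        · exact hsub x hx'
        · exact (hvm x).2 (h3 x hx')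
      have hnd' : (pvSatRound tree u).Nodup := by rw [h1]; exact h2
      have hfuel' : verts.length + 1 ≤ fuel + (pvSatRound tree u).length := by omega
      obtain ⟨c1, c2, c3, c4, c5⟩ := ih (pvSatRound tree u) hnd' hR' hsub' hfuel'
      rw [hsat, if_neg (by simpa using hlen)]
      refine ⟨?_, c2, c3, c4, c5⟩
      intro x hx
      exact c1 x (by rw [h1]; exact List.mem_append.2 (Or.inl hx))

-- ---- from closure to full reachability ----

theorem pvClosed_reach {E : List (String × String)} {root : String} {u : List String}
    (hroot : root ∈ u) (hclosed : ∀ x ∈ u, ∀ y, pvAdj E x y → y ∈ u) :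
    ∀ x, pvReach E root x → x ∈ u := by
  intro x h
  induction h with
  | refl => exact hroot
  | step _ hadj ih => exact hclosed _ ih _ hadj

-- two nodup lists with u ⊆ V: equal length ↔ V ⊆ u
theorem pvLen_iff {u V : List String} (hund : u.Nodup) (hVnd : V.Nodup)
    (hsub : ∀ x ∈ u, x ∈ V) : u.length = V.length ↔ ∀ x ∈ V, x ∈ u := by
  classical
  constructor
  · intro hlen x hxV
    have hs : u.toFinset ⊆ V.toFinset := by
      intro a ha
      simp only [List.mem_toFinset] at ha ⊢
      exact hsub a ha
    have hcard : V.toFinset.card ≤ u.toFinset.card := by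
      rw [List.toFinset_card_of_nodup hund, List.toFinset_card_of_nodup hVnd, hlen]
    have := Finset.eq_of_subset_of_card_le hs hcard
    have : x ∈ u.toFinset := this ▸ List.mem_toFinset.2 hxV
    exact List.mem_toFinset.1 this
  · intro hVu
    have : u.toFinset = V.toFinset := by
      apply Finset.Subset.antisymm <;> intro a ha <;>
        simp only [List.mem_toFinset] at ha ⊢
      · exact hsub a ha
      · exact hVu a ha
    rw [← List.toFinset_card_of_nodup hund, ← List.toFinset_card_of_nodup hVnd, this]

-- ---- the check loops agree ----

theorem pvCheckA_eq_all (ch : PySem.Dict String (List String)) (ks : List String) :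
    pvCheckA ch ks = ks.all (fun c =>
      !((ch.getD c []).length > 1 : Bool) &&
      !(ch.contains ((ch.getD c []).headD "") &&
        ((ch.getD ((ch.getD c []).headD "") []).headD "" == c))) := by
  induction ks with
  | nil => rfl
  | cons c t ih =>
    simp only [pvCheckA, List.all_cons, ← ih]
    split_ifs with h1 h2 <;> simp_all <;> try tauto
    intro _
    by_cases hb : ch.contains ((ch.getD c []).head?.getD "") = true
    · exact Or.inr (h2 hb)
    · exact Or.inl (by simpa using hb)

theorem pvCheck_eq (ch : PySem.Dict String (List String))
    (hnd : (PySem.Dict.keys ch).Nodup) (hne : ∀ v ∈ PySem.Dict.values ch, v ≠ []) :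
    pvCheckA ch ch.keys = pvCheckB ch := by
  rw [pvCheckA_eq_all, pvCheckB]
  have hkeys : PySem.Dict.keys ch = ch.items.map (fun x => x.1) := rfl
  rw [hkeys, List.all_map]
  rw [Bool.eq_iff_iff, List.all_eq_true, List.all_eq_true]
  have hpt : ∀ cp ∈ ch.items,
      ((fun c => (!((ch.getD c []).length > 1 : Bool) &&
        !(ch.contains ((ch.getD c []).headD "") &&
          ((ch.getD ((ch.getD c []).headD "") []).headD "" == c)))) ∘ (fun x => x.1)) cp
      = ((cp.2.length == 1) &&
        !(ch.contains (cp.2.headD "") && ((ch.getD (cp.2.headD "") []).headD "" == cp.1))) := by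
    intro cp hcp
    have hcp' : (cp.1, cp.2) ∈ ch.items := by simpa using hcp
    have hg : ch.getD cp.1 [] = cp.2 := PySem.Dict.getD_of_mem_items ch hcp' hnd []
    have hv : cp.2 ≠ [] := hne _ (List.mem_map_of_mem (f := fun x => x.2) hcp)
    have hlen : 1 ≤ cp.2.length := List.length_pos_iff.2 hv
    simp only [Function.comp, hg]
    congr 1
    rw [Bool.eq_iff_iff]
    simp only [Bool.not_eq_true', decide_eq_false_iff_not, not_lt, beq_iff_eq]
    omega
  constructor
  · intro hall cp hcp
    rw [← hpt cp hcp]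
    exact hall cp hcp
  · intro hall cp hcp
    rw [hpt cp hcp]
    exact hall cp hcp

-- ===== VERDICT (by name: the statement is the Claim_ definition above) =====
theorem is_family_spec : Claim_equal_is_family := by
  unfold Claim_equal_is_family
  intro tree hdom hpre
  unfold Spec_is_family
  obtain ⟨hne, hrows⟩ := hpre
  cases tree with
  | nil => exact absurd rfl hne
  | cons row0 trest =>
  have hrow0 : row0.length = 2 := hrows row0 List.mem_cons_self
  rcases row0 with _ | ⟨p0, _ | ⟨c0, _ | ⟨d0, t0⟩⟩⟩ <;> simp at hrow0
  -- abbreviations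
  have hbuildA : pvBuildA ([p0, c0] :: trest) =
      (([p0, c0] :: trest).foldl pvGRow PySem.Dict.empty,
       ([p0, c0] :: trest).foldl pvChRowA PySem.Dict.empty) :=
    pvBuildA_split _ _ _
  have hchBA : pvChRowB = pvChRowA := funext fun ch => funext fun row => (pvChRow_eq ch row).symm
  have hbuildB : pvBuildB ([p0, c0] :: trest) =
      (([p0, c0] :: trest).foldl pvChRowA PySem.Dict.empty,
       ([p0, c0] :: trest).foldl pvVRow []) := by
    rw [pvBuildB, pvBuildB_split, hchBA]
  set T : List (List String) := [p0, c0] :: trest with hT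
  set E : List (String × String) := pvEdges T with hE
  set g : PySem.Dict String (PySem.Set String) := T.foldl pvGRow PySem.Dict.empty with hg
  set ch : PySem.Dict String (List String) := T.foldl pvChRowA PySem.Dict.empty with hch
  set verts : List String := T.foldl pvVRow [] with hverts
  set R : String → Prop := pvReach E p0 with hRdef
  -- graph characterisations
  have hgc : ∀ x, g.contains x = true ↔ pvVert E x := by
    intro x
    rw [hg, pvGfold_contains, ← hE]
    simp [PySem.Dict.contains_empty]
  have hga : ∀ x y, PySem.Set.contains (g.getD x PySem.Set.empty) y = true ↔ pvAdj E x y := by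
    intro x y
    rw [hg, pvGfold_adj, ← hE]
    have : PySem.Set.contains ((PySem.Dict.empty :
        PySem.Dict String (PySem.Set String)).getD x PySem.Set.empty) y = false := by
      rw [PySem.Dict.getD_empty]
      rfl
    simp [this]
  have hgnd : (PySem.Dict.keys g).Nodup := by
    rw [hg]
    exact pvGfold_nodup _ _ (by rw [PySem.Dict.keys_empty]; exact List.nodup_nil)
  have hroot : pvVert E p0 := ⟨(p0, c0), by rw [hE]; simp [pvEdges, hT], Or.inl rfl⟩
  -- BFS side
  have hstepA : ∀ x y, R x →
      PySem.Set.contains (g.getD x PySem.Set.empty) y = true → R y :=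
    fun x y hx ha => pvReach.step hx ((hga x y).1 ha)
  have hkeysA : ∀ x y, PySem.Set.contains (g.getD x PySem.Set.empty) y = true →
      g.contains y = true :=
    fun x y ha => (hgc y).2 (pvAdj_vert ((hga x y).1 ha))
  have hused0 : PySem.Set.add PySem.Set.empty p0 = [p0] := rfl
  have hsize1 : 1 ≤ g.size := by
    rw [pvSize_keys]
    have : p0 ∈ PySem.Dict.keys g := (PySem.Dict.contains_iff_mem_keys g p0).1 ((hgc p0).2 hroot)
    exact List.length_pos_of_mem this
  obtain ⟨b1, b2, b3, b4, b5⟩ := pvBfs_spec g R hstepA hkeysA hgnd (2 * g.size + 1)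
    (PySem.Set.add PySem.Set.empty p0) [p0]
    (by rw [hused0]; exact List.nodup_singleton _)
    (List.nodup_singleton _)
    (by intro x hx; rw [hused0]; exact hx)
    (by
      intro x hx
      rw [hused0] at hx
      rcases List.mem_singleton.1 hx with rfl
      exact (hgc x).2 hroot)
    (by
      intro x hx
      rw [hused0] at hx
      rcases List.mem_singleton.1 hx with rfl
      exact pvReach.refl)
    (by
      intro x hx hnq
      rw [hused0] at hx
      exact absurd hx hnq)
    (by rw [hused0]; simp)
  set usedA : PySem.Set String := pvBfs g (2 * g.size + 1)
    (PySem.Set.add PySem.Set.empty p0) [p0] with husedA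
  have hAiff : ∀ x, x ∈ usedA ↔ R x := by
    intro x
    constructor
    · exact b3 x
    · refine pvClosed_reach (E := E) (root := p0) ?_ ?_ x
      · exact b1 p0 (by rw [hused0]; exact List.mem_singleton.2 rfl)
      · intro a ha y hy
        exact b5 a ha y ((hga a y).2 hy)
  -- saturation side
  have hvm : ∀ x, x ∈ verts ↔ pvVert E x := by
    intro x
    rw [hverts, pvVfold_mem, ← hE]
    simp
  have hvnd : verts.Nodup := pvVfold_nodup _ _ List.nodup_nil
  have hof0 : PySem.Set.ofList [p0] = [p0] := rfl
  obtain ⟨s1, s2, s3, s4, s5⟩ := pvSat_spec T R verts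
    (fun x y hx ha => pvReach.step hx ha) hvm hvnd (verts.length + 1)
    (PySem.Set.ofList [p0])
    (by rw [hof0]; exact List.nodup_singleton _)
    (by
      intro x hx
      rw [hof0] at hx
      rcases List.mem_singleton.1 hx with rfl
      exact pvReach.refl)
    (by
      intro x hx
      rw [hof0] at hx
      rcases List.mem_singleton.1 hx with rfl
      exact (hvm x).2 hroot)
    (by rw [hof0]; simp)
  set usedB : PySem.Set String := pvSat T (verts.length + 1) (PySem.Set.ofList [p0]) with husedB
  have hBiff : ∀ x, x ∈ usedB ↔ R x := by
    intro x
    constructor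
    · exact s3 x
    · refine pvClosed_reach (E := E) (root := p0) ?_ ?_ x
      · exact s1 p0 (by rw [hof0]; exact List.mem_singleton.2 rfl)
      · intro a ha y hy
        exact s5 a ha y hy
  -- the two connectivity conditions are equivalent
  have hAcond : usedA.length = g.size ↔ (∀ x, pvVert E x → R x) := by
    rw [pvSize_keys]
    rw [pvLen_iff b2 hgnd
      (fun x hx => (PySem.Dict.contains_iff_mem_keys g x).1 (b4 x hx))]
    constructor
    · intro h x hv
      exact (hAiff x).1 (h x ((PySem.Dict.contains_iff_mem_keys g x).1 ((hgc x).2 hv)))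
    · intro h x hx
      exact (hAiff x).2 (h x ((hgc x).1 ((PySem.Dict.contains_iff_mem_keys g x).2 hx)))
  have hBcond : usedB.length = verts.length ↔ (∀ x, pvVert E x → R x) := by
    rw [pvLen_iff s2 hvnd s4]
    constructor
    · intro h x hv
      exact (hBiff x).1 (h x ((hvm x).2 hv))
    · intro h x hx
      exact (hBiff x).2 (h x ((hvm x).1 hx))
  -- children dicts
  have hchnd : (PySem.Dict.keys ch).Nodup := by
    rw [hch]
    exact pvChfold_nodup _ _ (by rw [PySem.Dict.keys_empty]; exact List.nodup_nil)
  have hchne : ∀ v ∈ PySem.Dict.values ch, v ≠ [] := by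
    rw [hch]
    exact pvChfold_values_ne_nil _ _ (by intro v hv; simp [PySem.Dict.values, PySem.Dict.empty] at hv)
  have hcheck : pvCheckA ch ch.keys = pvCheckB ch := pvCheck_eq ch hchnd hchne
  -- assemble
  have hAeq : is_family T =
      (if usedA.length != g.size then false else pvCheckA ch ch.keys) := by
    show (if (pvBfs (pvBuildA T).1 (2 * (pvBuildA T).1.size + 1)
        (PySem.Set.add PySem.Set.empty ([p0, c0].headD "")) [[p0, c0].headD ""]).length
          != (pvBuildA T).1.size then false
      else pvCheckA (pvBuildA T).2 (PySem.Dict.keys (pvBuildA T).2)) = _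
    rw [hbuildA]
    rfl
  have hBeq : is_family_alt T =
      (if usedB.length != verts.length then false else pvCheckB ch) := by
    show (if (pvSat T ((pvBuildB T).2.length + 1)
        (PySem.Set.ofList [[p0, c0].headD ""])).length != (pvBuildB T).2.length then false
      else pvCheckB (pvBuildB T).1) = _
    rw [hbuildB]
    rfl
  rw [hAeq, hBeq]
  by_cases hPA : ∀ x, pvVert E x → R x
  · have h1 : usedA.length = g.size := hAcond.2 hPA
    have h2 : usedB.length = verts.length := hBcond.2 hPA
    simp [h1, h2, hcheck]
  · have h1 : ¬ usedA.length = g.size := fun h => hPA (hAcond.1 h)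
    have h2 : ¬ usedB.length = verts.length := fun h => hPA (hBcond.1 h)
    simp [h1, h2]
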